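-- pv_equiv track=rewrite | github.com/kamimrcht/ELECTOR | computeStats.py | nbLeftGaps
-- ===== SOURCE A (Python) =====
-- THRESH=5
--
-- def nbLeftGaps(sequence):
-- 	nbGaps = 0
-- 	nbNt = 0
-- 	totalGaps = 0
-- 	i = 0
-- 	while (i < len(sequence) and nbNt <= THRESH):
-- 		if sequence[i] == ".":
-- 			nbGaps += 1
-- 			nbNt = 0
-- 		else:
-- 			if (nbGaps >= THRESH):
-- 				totalGaps = i
-- 			nbGaps = 0
-- 			nbNt += 1
-- 		i += 1
--
-- 	return totalGaps
-- ===== SOURCE B (Python) =====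
-- from itertools import groupby
--
-- THRESH = 5
--
-- def nbLeftGaps(sequence):
--     totalGaps = 0
--     offset = 0
--     prev_gap = 0
--     for is_gap, grp in groupby(sequence, key=lambda c: c == "."):
--         n = sum(1 for _ in grp)
--         if is_gap:
--             prev_gap = n
--             offset += n
--         else:
--             if prev_gap >= THRESH:
--                 totalGaps = offset
--             prev_gap = 0
--             if n > THRESH:
--                 break
--             offset += n
--     return totalGaps
-- ===== Notes on version B (the rewrite author's own statement) =====
-- stated objective: idiomatic
-- what changed: B replaces A's per-character while loop with manual nbGaps/nbNt counters by an itertools.groupby run-length scan over maximal gap/non-gap runs, keeping only an offset and the previous gap-run length and breaking at the first non-gap run longer than THRESH.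
import Mathlib
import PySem

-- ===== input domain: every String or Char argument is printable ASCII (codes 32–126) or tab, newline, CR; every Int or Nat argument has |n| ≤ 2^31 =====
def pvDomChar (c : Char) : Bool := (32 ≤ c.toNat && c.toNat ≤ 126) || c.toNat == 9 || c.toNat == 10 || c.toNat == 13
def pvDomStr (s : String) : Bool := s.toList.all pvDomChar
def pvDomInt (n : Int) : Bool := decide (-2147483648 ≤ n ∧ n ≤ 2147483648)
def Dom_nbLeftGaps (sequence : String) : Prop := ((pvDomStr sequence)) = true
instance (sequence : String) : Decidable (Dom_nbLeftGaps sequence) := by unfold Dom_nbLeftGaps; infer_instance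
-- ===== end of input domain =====

-- B replaces the per-character while loop by a run-length scan over maximal gap/non-gap runs
-- (itertools.groupby in Source B): objective 'idiomatic', same result, same asymptotic cost.

-- ===== PORT A =====
-- A's while loop: state (nbGaps, nbNt, totalGaps, i); one step per character.
def nbLeftGapsLoop (cs : List Char) (nbGaps nbNt totalGaps i : Int) : Int :=
  match cs with
  | [] => totalGaps
  | c :: rest =>
    if nbNt ≤ 5 then
      if c = '.' then nbLeftGapsLoop rest (nbGaps + 1) 0 totalGaps (i + 1)
      else nbLeftGapsLoop rest 0 (nbNt + 1) (if nbGaps ≥ 5 then i else totalGaps) (i + 1)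
    else totalGaps

def nbLeftGaps (sequence : String) : Int :=
  nbLeftGapsLoop sequence.toList 0 0 0 0

-- ===== PORT B =====
-- B's groupby loop: one step per maximal run (takeWhile/dropWhile = the run groupby yields).
def nbLeftGapsAltLoop (cs : List Char) (offset totalGaps prevGap : Int) : Int :=
  match cs with
  | [] => totalGaps
  | c :: rest =>
    if c = '.' then
      let g : Int := 1 + ((rest.takeWhile (fun x => x = '.')).length : Int)
      nbLeftGapsAltLoop (rest.dropWhile (fun x => x = '.')) (offset + g) totalGaps g
    else
      let n : Int := 1 + ((rest.takeWhile (fun x => x ≠ '.')).length : Int)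
      let t := if prevGap ≥ 5 then offset else totalGaps
      if n > 5 then t
      else nbLeftGapsAltLoop (rest.dropWhile (fun x => x ≠ '.')) (offset + n) t 0
termination_by cs.length
decreasing_by
  · simpa using Nat.lt_succ_of_le (List.length_dropWhile_le _ _)
  · simpa using Nat.lt_succ_of_le (List.length_dropWhile_le _ _)

def nbLeftGaps_alt (sequence : String) : Int :=
  nbLeftGapsAltLoop sequence.toList 0 0 0

-- ===== PRECONDITION & SPEC =====
def Spec_nbLeftGaps (sequence : String) (out : Int) : Prop := out = nbLeftGaps_alt sequence
instance (sequence : String) (out : Int) : Decidable (Spec_nbLeftGaps sequence out) := by unfold Spec_nbLeftGaps; infer_instance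

-- ===== CLAIM (what is proved, stated in full; the proofs are below) =====
def Claim_equal_nbLeftGaps : Prop := ∀ (sequence : String), Dom_nbLeftGaps sequence → Spec_nbLeftGaps sequence (nbLeftGaps sequence)

-- ===== LEMMAS AND PROOFS =====

-- head of a dropWhile never satisfies the predicate
theorem pv_head_dropWhile {α : Type} (p : α → Bool) (l : List α) (c : α)
    (h : (l.dropWhile p).head? = some c) : p c = false := by
  induction l with
  | nil => simp [List.dropWhile] at h
  | cons a l ih =>
    by_cases hp : p a = true
    · rw [List.dropWhile_cons_of_pos hp] at h; exact ih h
    · rw [List.dropWhile_cons_of_neg hp] at h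
      simp only [List.head?_cons, Option.some.injEq] at h
      subst h; simpa using hp

-- A consumes a whole gap run ('.'-only block) accumulating nbGaps
theorem pv_gapAux (run : List Char) (rest : List Char) (g0 tg i : Int)
    (hall : ∀ c ∈ run, c = '.') :
    nbLeftGapsLoop (run ++ rest) g0 0 tg i
      = nbLeftGapsLoop rest (g0 + run.length) 0 tg (i + run.length) := by
  induction run generalizing g0 i with
  | nil => simp
  | cons c run' ih =>
    have hc : c = '.' := hall c (by simp)
    have hstep : nbLeftGapsLoop ((c :: run') ++ rest) g0 0 tg i
        = nbLeftGapsLoop (run' ++ rest) (g0 + 1) 0 tg (i + 1) := by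
      simp [nbLeftGapsLoop, hc]
    rw [hstep, ih (g0 + 1) (i + 1) (fun x hx => hall x (List.mem_cons_of_mem _ hx))]
    have h1 : g0 + 1 + (run'.length : Int) = g0 + ((c :: run').length : Int) := by
      push_cast [List.length_cons]; ring
    have h2 : i + 1 + (run'.length : Int) = i + ((c :: run').length : Int) := by
      push_cast [List.length_cons]; ring
    rw [h1, h2]

-- A consumes a non-gap run with nbGaps = 0: pure nbNt counting, stop past 6
theorem pv_ntAux (run : List Char) (rest : List Char) (m tg i : Int)
    (hall : ∀ c ∈ run, ¬ c = '.') :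
    nbLeftGapsLoop (run ++ rest) 0 m tg i
      = if m + (run.length : Int) ≤ 6 then nbLeftGapsLoop rest 0 (m + run.length) tg (i + run.length) else tg := by
  induction run generalizing m i with
  | nil =>
    by_cases h6 : m ≤ 6
    · simp [h6]
    · have h5 : ¬ m ≤ 5 := by omega
      cases rest with
      | nil => simp [nbLeftGapsLoop, h6]
      | cons d r => simp [nbLeftGapsLoop, h5, h6]
  | cons c run' ih =>
    have hc : ¬ c = '.' := hall c (by simp)
    have hlc : ((c :: run').length : Int) = (run'.length : Int) + 1 := by
      push_cast [List.length_cons]; ring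
    by_cases h5 : m ≤ 5
    · have hstep : nbLeftGapsLoop ((c :: run') ++ rest) 0 m tg i
          = nbLeftGapsLoop (run' ++ rest) 0 (m + 1) tg (i + 1) := by
        simp [nbLeftGapsLoop, h5, hc]
      rw [hstep, ih (m + 1) (i + 1) (fun x hx => hall x (List.mem_cons_of_mem _ hx)), hlc]
      by_cases h6 : m + 1 + (run'.length : Int) ≤ 6
      · rw [if_pos h6, if_pos (show m + ((run'.length : Int) + 1) ≤ 6 by omega)]
        have e1 : m + 1 + (run'.length : Int) = m + ((run'.length : Int) + 1) := by ring
        have e2 : i + 1 + (run'.length : Int) = i + ((run'.length : Int) + 1) := by ring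
        rw [e1, e2]
      · rw [if_neg h6, if_neg (show ¬ m + ((run'.length : Int) + 1) ≤ 6 by omega)]
    · rw [hlc, if_neg (show ¬ m + ((run'.length : Int) + 1) ≤ 6 by omega)]
      simp [nbLeftGapsLoop, h5]

-- main invariant: at every run boundary A's state (nbGaps, nbNt) matches B's (prevGap, 0)
theorem pv_main (n : Nat) : ∀ (cs : List Char), cs.length ≤ n → ∀ (pg nbNt tg i : Int),
    nbNt ≤ 5 →
    (∀ c, cs.head? = some c → c = '.' → pg = 0) →
    (∀ c, cs.head? = some c → ¬ c = '.' → nbNt = 0) →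
    nbLeftGapsLoop cs pg nbNt tg i = nbLeftGapsAltLoop cs i tg pg := by
  induction n with
  | zero =>
    intro cs hlen pg nbNt tg i _ _ _
    have : cs = [] := List.eq_nil_of_length_eq_zero (Nat.le_zero.mp hlen)
    subst this
    simp [nbLeftGapsLoop, nbLeftGapsAltLoop]
  | succ n ih =>
    intro cs hlen pg nbNt tg i h5 hg hn
    cases cs with
    | nil => simp [nbLeftGapsLoop, nbLeftGapsAltLoop]
    | cons c rest =>
      have hrest : rest.length ≤ n := by simp at hlen; omega
      by_cases hc : c = '.'
      · -- gap run
        have hpg : pg = 0 := hg c rfl hc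
        subst hpg
        set tw := rest.takeWhile (fun x => x = '.') with htw
        set dw := rest.dropWhile (fun x => x = '.') with hdw
        have hsplit : tw ++ dw = rest := List.takeWhile_append_dropWhile
        have hstep : nbLeftGapsLoop (c :: rest) 0 nbNt tg i
            = nbLeftGapsLoop rest 1 0 tg (i + 1) := by
          simp [nbLeftGapsLoop, hc, h5]
        have hA : nbLeftGapsLoop rest 1 0 tg (i + 1)
            = nbLeftGapsLoop dw (1 + (tw.length : Int)) 0 tg (i + 1 + tw.length) := by
          conv_lhs => rw [← hsplit]
          exact pv_gapAux tw dw 1 tg (i + 1)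
            (fun x hx => by simpa using List.mem_takeWhile_imp hx)
        have hB : nbLeftGapsAltLoop (c :: rest) i tg 0
            = nbLeftGapsAltLoop dw (i + (1 + (tw.length : Int))) tg (1 + (tw.length : Int)) := by
          rw [nbLeftGapsAltLoop]; simp [hc, htw, hdw]
        rw [hstep, hA, hB]
        have e : i + 1 + (tw.length : Int) = i + (1 + (tw.length : Int)) := by ring
        rw [e]
        apply ih dw (le_trans (List.length_dropWhile_le _ _) hrest)
        · norm_num
        · intro d hd hd'
          have := pv_head_dropWhile _ _ _ hd
          simp [hd'] at this
        · intro d hd hd'; rfl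
      · -- non-gap run
        have hnt : nbNt = 0 := hn c rfl hc
        subst hnt
        set tw := rest.takeWhile (fun x => x ≠ '.') with htw
        set dw := rest.dropWhile (fun x => x ≠ '.') with hdw
        have hsplit : tw ++ dw = rest := List.takeWhile_append_dropWhile
        set t := (if pg ≥ 5 then i else tg) with ht
        have hstep : nbLeftGapsLoop (c :: rest) pg 0 tg i
            = nbLeftGapsLoop rest 0 1 t (i + 1) := by
          simp [nbLeftGapsLoop, hc, ht]
        have hA : nbLeftGapsLoop rest 0 1 t (i + 1)
            = if 1 + (tw.length : Int) ≤ 6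
              then nbLeftGapsLoop dw 0 (1 + tw.length) t (i + 1 + tw.length)
              else t := by
          conv_lhs => rw [← hsplit]
          exact pv_ntAux tw dw 1 t (i + 1)
            (fun x hx => by simpa using List.mem_takeWhile_imp hx)
        have hB : nbLeftGapsAltLoop (c :: rest) i tg pg
            = if 1 + (tw.length : Int) > 5
              then t
              else nbLeftGapsAltLoop dw (i + (1 + (tw.length : Int))) t 0 := by
          rw [nbLeftGapsAltLoop]; simp [hc, htw, hdw, ht]
        rw [hstep, hA, hB]
        by_cases hlen6 : 1 + (tw.length : Int) ≤ 5
        · rw [if_pos (show (1 : Int) + (tw.length : Int) ≤ 6 by omega),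
            if_neg (show ¬ (1 : Int) + (tw.length : Int) > 5 by omega)]
          have e : i + 1 + (tw.length : Int) = i + (1 + (tw.length : Int)) := by ring
          rw [e]
          apply ih dw (le_trans (List.length_dropWhile_le _ _) hrest)
          · omega
          · intro d hd hd'; rfl
          · intro d hd hd'
            have := pv_head_dropWhile _ _ _ hd
            simp at this
            exact absurd this hd'
        · rw [if_pos (show (1 : Int) + (tw.length : Int) > 5 by omega)]
          by_cases h6 : 1 + (tw.length : Int) ≤ 6
          · rw [if_pos h6]
            have h66 : (1 : Int) + (tw.length : Int) = 6 := by omega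
            rw [h66]
            cases dw with
            | nil => simp [nbLeftGapsLoop]
            | cons d r => norm_num [nbLeftGapsLoop]
          · rw [if_neg h6]

-- ===== VERDICT (by name: the statement is the Claim_ definition above) =====
theorem nbLeftGaps_spec : Claim_equal_nbLeftGaps := by
  intro s _
  unfold Spec_nbLeftGaps nbLeftGaps nbLeftGaps_alt
  exact pv_main s.toList.length s.toList le_rfl 0 0 0 0 (by norm_num)
    (fun _ _ _ => rfl) (fun _ _ _ => rfl)
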